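-- pv_equiv track=rewrite | github.com/xdnw/treaty-vis | scripts/score.py | parse_top_membership_values
-- ===== SOURCE A (Python) =====
-- def parse_top_membership_values(raw: str) -> list[int]:
-- 	values: set[int] = set()
-- 	for chunk in str(raw).split(","):
-- 		text = chunk.strip()
-- 		if not text:
-- 			continue
-- 		parsed = int(text)
-- 		if parsed <= 0:
-- 			continue
-- 		values.add(parsed)
-- 	return sorted(values)
-- ===== SOURCE B (Python) =====
-- def _insert_unique(sorted_vals: list[int], v: int) -> list[int]:
--     """Place v into a strictly increasing list, keeping it strictly increasing."""
--     if not sorted_vals: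
--         return [v]
--     head = sorted_vals[0]
--     if v < head:
--         return [v] + sorted_vals
--     if v == head:
--         return sorted_vals
--     return [head] + _insert_unique(sorted_vals[1:], v)
--
-- def parse_top_membership_values(raw: str) -> list[int]:
--     result: list[int] = []
--     for chunk in str(raw).split(","):
--         text = chunk.strip()
--         if not text:
--             continue
--         parsed = int(text)
--         if parsed > 0:
--             result = _insert_unique(result, parsed)
--     return result
-- ===== Notes on version B (the rewrite author's own statement) =====
-- stated objective: alternative
-- what changed: Replaces set-accumulation followed by a final sort with incremental insertion: each parsed positive is recursively inserted into its ordered position in a strictly increasing result list (insertion sort with dedup), so no set and no sort call exist.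
import Mathlib
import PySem

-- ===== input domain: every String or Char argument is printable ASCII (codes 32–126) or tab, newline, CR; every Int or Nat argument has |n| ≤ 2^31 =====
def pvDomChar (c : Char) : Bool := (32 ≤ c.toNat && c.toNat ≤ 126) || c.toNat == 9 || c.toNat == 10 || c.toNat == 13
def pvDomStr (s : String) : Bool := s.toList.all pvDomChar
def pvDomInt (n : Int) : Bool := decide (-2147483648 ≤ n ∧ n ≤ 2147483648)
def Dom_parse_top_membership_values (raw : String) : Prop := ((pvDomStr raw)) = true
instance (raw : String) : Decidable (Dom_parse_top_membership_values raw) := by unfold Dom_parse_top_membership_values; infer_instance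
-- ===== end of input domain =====

-- B replaces A's set-accumulation + final sort with incremental recursive insertion into a
-- strictly increasing result list (insertion sort with dedup); alternative decomposition.

-- ===== PORT A =====
-- loop body of A: strip, skip empties, int(), skip <= 0, add to the set
-- (on an unparsable non-empty chunk Python A raises ValueError; those inputs are outside Pre_ below)
def pvStepA (values : PySem.Set Int) (chunk : String) : PySem.Set Int :=
  let text := PySem.Str.strip chunk
  if text = "" then values
  else
    match PySem.Int.ofStr? text with
    | none => values
    | some parsed => if parsed ≤ 0 then values else PySem.Set.add values parsed

def parse_top_membership_values (raw : String) : List Int :=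
  let values : PySem.Set Int := ((PySem.Str.split? raw ",").getD []).foldl pvStepA PySem.Set.empty
  PySem.List.sorted values (fun x => x) false

-- ===== PORT B =====
-- _insert_unique of Source B: place v into a strictly increasing list, keeping it strictly increasing
def pvIns : List Int → Int → List Int
  | [], v => [v]
  | head :: rest, v =>
      if v < head then v :: head :: rest
      else if v = head then head :: rest
      else head :: pvIns rest v

-- loop body of B: strip, skip empties, int(), insert positives into the sorted result
def pvStepB (result : List Int) (chunk : String) : List Int :=
  let text := PySem.Str.strip chunk
  if text = "" then result
  else
    match PySem.Int.ofStr? text with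
    | none => result
    | some parsed => if parsed > 0 then pvIns result parsed else result

def parse_top_membership_values_alt (raw : String) : List Int :=
  ((PySem.Str.split? raw ",").getD []).foldl pvStepB []

-- ===== PRECONDITION & SPEC =====
-- Pre_ excludes exactly the inputs on which Python A raises ValueError: a chunk that is
-- non-empty after stripping but not parseable by int().
def Pre_parse_top_membership_values (raw : String) : Prop :=
  ∀ chunk ∈ (PySem.Str.split? raw ",").getD [],
    PySem.Str.strip chunk ≠ "" → (PySem.Int.ofStr? (PySem.Str.strip chunk)).isSome = true
instance (raw : String) : Decidable (Pre_parse_top_membership_values raw) := by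
  unfold Pre_parse_top_membership_values; infer_instance
def pvWitness_parse_top_membership_values : String := "3, 1,2,2, -4, ,5"
def Spec_parse_top_membership_values (raw : String) (out : List Int) : Prop := out = parse_top_membership_values_alt raw
instance (raw : String) (out : List Int) : Decidable (Spec_parse_top_membership_values raw out) := by unfold Spec_parse_top_membership_values; infer_instance

-- ===== CLAIM (what is proved, stated in full; the proofs are below) =====
def Claim_equal_parse_top_membership_values : Prop := ∀ (raw : String), Dom_parse_top_membership_values raw → Pre_parse_top_membership_values raw → Spec_parse_top_membership_values raw (parse_top_membership_values raw)

-- ===== LEMMAS AND PROOFS =====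

lemma mem_pvIns (res : List Int) (v y : Int) : y ∈ pvIns res v ↔ y = v ∨ y ∈ res := by
  induction res with
  | nil => simp [pvIns]
  | cons x xs ih =>
    unfold pvIns
    by_cases h1 : v < x
    · rw [if_pos h1]; simp only [List.mem_cons]
    · rw [if_neg h1]
      by_cases h2 : v = x
      · rw [if_pos h2]; subst h2; simp only [List.mem_cons]; tauto
      · rw [if_neg h2]; simp only [List.mem_cons, ih]; tauto

lemma pairwise_pvIns (res : List Int) (v : Int) (h : res.Pairwise (· < ·)) :
    (pvIns res v).Pairwise (· < ·) := by
  induction res with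
  | nil => simp [pvIns]
  | cons x xs ih =>
    rcases List.pairwise_cons.mp h with ⟨hx, hxs⟩
    unfold pvIns
    by_cases h1 : v < x
    · rw [if_pos h1]
      exact List.pairwise_cons.mpr ⟨by
        intro a ha
        rcases List.mem_cons.mp ha with rfl | ha
        · exact h1
        · exact lt_trans h1 (hx a ha), h⟩
    · rw [if_neg h1]
      by_cases h2 : v = x
      · rw [if_pos h2]; exact h
      · have hxv : x < v := lt_of_le_of_ne (not_lt.mp h1) (Ne.symm h2)
        rw [if_neg h2]
        exact List.pairwise_cons.mpr ⟨by
          intro a ha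
          rcases (mem_pvIns xs v a).mp ha with rfl | ha
          · exact hxv
          · exact hx a ha, ih hxs⟩

-- invariant over the loop: B's accumulator stays strictly increasing with the same members as A's set
lemma fold_invariant (chunks : List String) :
    ∀ (s : PySem.Set Int) (res : List Int),
    res.Pairwise (· < ·) → (∀ y, y ∈ res ↔ y ∈ s) →
    (chunks.foldl pvStepB res).Pairwise (· < ·) ∧
    (∀ y, y ∈ chunks.foldl pvStepB res ↔ y ∈ chunks.foldl pvStepA s) := by
  induction chunks with
  | nil => intro s res hp hm; exact ⟨hp, hm⟩
  | cons c rest ih =>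
    intro s res hp hm
    simp only [List.foldl_cons]
    by_cases he : PySem.Str.strip c = ""
    · have h1 : pvStepB res c = res := by
        simp only [pvStepB]; rw [if_pos he]
      have h2 : pvStepA s c = s := by
        simp only [pvStepA]; rw [if_pos he]
      rw [h1, h2]; exact ih s res hp hm
    · cases h : PySem.Int.ofStr? (PySem.Str.strip c) with
      | none =>
        have h1 : pvStepB res c = res := by
          simp only [pvStepB]; rw [if_neg he, h]
        have h2 : pvStepA s c = s := by
          simp only [pvStepA]; rw [if_neg he, h]
        rw [h1, h2]; exact ih s res hp hm
      | some parsed =>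
        by_cases hpos : parsed ≤ 0
        · have h1 : pvStepB res c = res := by
            simp only [pvStepB]; rw [if_neg he, h]; exact if_neg (not_lt.mpr hpos)
          have h2 : pvStepA s c = s := by
            simp only [pvStepA]; rw [if_neg he, h]; exact if_pos hpos
          rw [h1, h2]; exact ih s res hp hm
        · have h1 : pvStepB res c = pvIns res parsed := by
            simp only [pvStepB]; rw [if_neg he, h]; exact if_pos (lt_of_not_ge hpos)
          have h2 : pvStepA s c = PySem.Set.add s parsed := by
            simp only [pvStepA]; rw [if_neg he, h]; exact if_neg hpos
          rw [h1, h2]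
          refine ih (PySem.Set.add s parsed) (pvIns res parsed)
            (pairwise_pvIns res parsed hp) ?_
          intro y
          rw [mem_pvIns, PySem.Set.mem_add, hm y]
          exact or_comm

lemma ports_agree (raw : String) :
    parse_top_membership_values raw = parse_top_membership_values_alt raw := by
  unfold parse_top_membership_values parse_top_membership_values_alt
  set chunks := (PySem.Str.split? raw ",").getD [] with hc
  obtain ⟨hp, hm⟩ := fold_invariant chunks PySem.Set.empty []
    List.Pairwise.nil (by simp [PySem.Set.empty])
  have hnodupA : (chunks.foldl pvStepA PySem.Set.empty).Nodup := by
    have : ∀ (cs : List String) (s : PySem.Set Int), s.Nodup → (cs.foldl pvStepA s).Nodup := by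
      intro cs
      induction cs with
      | nil => intro s h; exact h
      | cons c rest ih =>
        intro s h
        refine ih (pvStepA s c) ?_
        unfold pvStepA
        by_cases he : PySem.Str.strip c = ""
        · simpa [he]
        · cases h' : PySem.Int.ofStr? (PySem.Str.strip c) with
          | none => simpa [he, h']
          | some p =>
            by_cases hp' : p ≤ 0
            · simpa [he, h', hp']
            · simpa [he, h', hp'] using PySem.Set.nodup_add s p h
    exact this chunks PySem.Set.empty (by simp [PySem.Set.empty])
  apply PySem.List.sorted_eq_of_perm_of_pairwise_lt
  · exact (List.perm_ext_iff_of_nodup (hp.imp (fun h => ne_of_lt h)) hnodupA).mpr hm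
  · simpa using hp

-- ===== VERDICT (by name: the statement is the Claim_ definition above) =====
theorem parse_top_membership_values_spec : Claim_equal_parse_top_membership_values := by
  intro raw _ _
  unfold Spec_parse_top_membership_values
  exact ports_agree raw
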